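-- pv_equiv track=rewrite | github.com/minguk1/ssafy-study | pythonProject1/고대 유적.py | count
-- ===== SOURCE A (Python) =====
-- def count(arr):
--     mx = 2
--     for lst in arr:
--         cnt = 0
--         for i in lst:
--             if i == 1:
--                 cnt += 1
--                 if mx < cnt:
--                     mx = cnt
--             else:
--                 cnt = 0
--     return mx
-- ===== SOURCE B (Python) =====
-- def count(arr):
--     best = 2
--     for row in arr:
--         i, n = 0, len(row)
--         while i < n:
--             j = i
--             while j < n and row[j] == row[i]:
--                 j += 1
--             if row[i] == 1:
--                 best = max(best, j - i)
--             i = j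
--     return best
-- ===== Notes on version B (the rewrite author's own statement) =====
-- stated objective: alternative
-- what changed: B splits each row into maximal runs of equal elements (a groupby-style run decomposition with two index pointers) and takes the max length over runs of 1s floored at 2, instead of A's single counter-reset scan.
import Mathlib
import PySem

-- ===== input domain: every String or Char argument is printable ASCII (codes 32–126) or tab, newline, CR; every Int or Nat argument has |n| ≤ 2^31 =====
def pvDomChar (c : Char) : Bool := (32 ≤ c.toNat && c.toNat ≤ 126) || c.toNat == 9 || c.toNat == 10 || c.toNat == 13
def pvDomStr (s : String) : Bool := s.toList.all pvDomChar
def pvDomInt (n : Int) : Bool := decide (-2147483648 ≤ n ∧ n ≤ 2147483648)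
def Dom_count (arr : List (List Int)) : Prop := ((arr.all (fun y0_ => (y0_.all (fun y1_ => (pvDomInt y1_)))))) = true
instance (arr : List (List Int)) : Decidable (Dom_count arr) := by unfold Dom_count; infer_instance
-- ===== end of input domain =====

-- B differs from A by a groupby-style run decomposition per row (alternative, same cost).

-- ===== PORT A =====
-- inner loop state: (mx, cnt)
def countStep (s : Int × Int) (i : Int) : Int × Int :=
  if i = 1 then
    let cnt := s.2 + 1
    (if s.1 < cnt then cnt else s.1, cnt)
  else (s.1, 0)

def count (arr : List (List Int)) : Int :=
  arr.foldl (fun mx lst => (lst.foldl countStep (mx, 0)).1) 2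

-- ===== PORT B =====
-- Source B's inner while loops: split the row at the end of the first maximal run of
-- equal elements (span = the 'while j < n and row[j] == row[i]' scan), then continue
-- after it; update best when the run's key is 1.
def countRun (best : Int) : List Int → Int
  | [] => best
  | x :: rest =>
    let s := rest.span (fun y => y = x)
    countRun (if x = 1 then max best (1 + (s.1.length : Int)) else best) s.2
termination_by xs => xs.length
decreasing_by
  simp only [List.span_eq_takeWhile_dropWhile]
  exact Nat.lt_succ_of_le (List.length_dropWhile_le _ _)

def count_alt (arr : List (List Int)) : Int :=
  arr.foldl (fun best row => countRun best row) 2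

-- ===== PRECONDITION & SPEC =====
def Spec_count (arr : List (List Int)) (out : Int) : Prop := out = count_alt arr
instance (arr : List (List Int)) (out : Int) : Decidable (Spec_count arr out) := by unfold Spec_count; infer_instance

-- ===== CLAIM (what is proved, stated in full; the proofs are below) =====
def Claim_equal_count : Prop := ∀ (arr : List (List Int)), Dom_count arr → Spec_count arr (count arr)

-- ===== LEMMAS AND PROOFS =====

-- reference function: best run of ones in xs, with the current open run having length cnt
def bestExt : List Int → Int → Int
  | [], cnt => cnt
  | x :: xs, cnt => if x = 1 then bestExt xs (cnt + 1) else max cnt (bestExt xs 0)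

theorem bestExt_ge (xs : List Int) : ∀ cnt : Int, cnt ≤ bestExt xs cnt := by
  induction xs with
  | nil => intro cnt; simp [bestExt]
  | cons x xs ih =>
    intro cnt
    simp only [bestExt]
    split
    · exact le_trans (by omega) (ih (cnt + 1))
    · exact le_max_left _ _

theorem lemA (xs : List Int) : ∀ mx cnt : Int, 0 ≤ cnt → cnt ≤ mx →
    (xs.foldl countStep (mx, cnt)).1 = max mx (bestExt xs cnt) := by
  induction xs with
  | nil => intro mx cnt h0 h1; simp [bestExt]; omega
  | cons x xs ih =>
    intro mx cnt h0 h1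
    simp only [List.foldl_cons, countStep, bestExt]
    by_cases hx : x = 1
    · simp only [if_pos hx]
      have h2 : (if mx < cnt + 1 then cnt + 1 else mx) = max mx (cnt + 1) := by
        split <;> omega
      rw [h2, ih (max mx (cnt + 1)) (cnt + 1) (by omega) (le_max_right _ _)]
      have := bestExt_ge xs (cnt + 1)
      omega
    · simp only [if_neg hx]
      rw [ih mx 0 le_rfl (by omega)]
      have := bestExt_ge xs 0
      omega

theorem bestExt_ones_append (r : List Int) (hr : ∀ y ∈ r, y = 1) :
    ∀ (rest : List Int) (cnt : Int), bestExt (r ++ rest) cnt = bestExt rest (cnt + r.length) := by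
  induction r with
  | nil => intro rest cnt; simp
  | cons y r ih =>
    intro rest cnt
    have hy : y = 1 := hr y (by simp)
    simp only [List.cons_append, bestExt, if_pos hy]
    rw [ih (fun z hz => hr z (by simp [hz])) rest (cnt + 1)]
    congr 1
    simp only [List.length_cons]
    push_cast
    ring

theorem bestExt_not_one_head (rest : List Int)
    (h : rest = [] ∨ ∃ y t, rest = y :: t ∧ y ≠ 1) (cnt : Int) (h0 : 0 ≤ cnt) :
    bestExt rest cnt = max cnt (bestExt rest 0) := by
  rcases h with h | ⟨y, t, rfl, hy⟩
  · subst h; simp [bestExt]; omega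
  · simp only [bestExt, if_neg hy]
    have := bestExt_ge t 0
    omega

theorem bestExt_nonones_append (r : List Int) (hr : ∀ y ∈ r, y ≠ 1) :
    ∀ rest : List Int, bestExt (r ++ rest) 0 = max 0 (bestExt rest 0) := by
  induction r with
  | nil =>
    intro rest
    have := bestExt_ge rest 0
    simp; omega
  | cons y r ih =>
    intro rest
    have hy : y ≠ 1 := hr y (by simp)
    simp only [List.cons_append, bestExt, if_neg hy]
    rw [ih (fun z hz => hr z (by simp [hz])) rest]
    omega

theorem dropWhile_shape (x : Int) (rest : List Int) :
    rest.dropWhile (fun y => decide (y = x)) = [] ∨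
    ∃ y t, rest.dropWhile (fun y => decide (y = x)) = y :: t ∧ y ≠ x := by
  cases hd : rest.dropWhile (fun y => decide (y = x)) with
  | nil => exact Or.inl rfl
  | cons y t =>
    refine Or.inr ⟨y, t, rfl, ?_⟩
    have := List.head_dropWhile_not (fun y => decide (y = x)) (l := rest) (by simp [hd])
    simp [hd] at this
    exact this

theorem lemB (n : ℕ) : ∀ xs : List Int, xs.length ≤ n → ∀ best : Int, 0 ≤ best →
    countRun best xs = max best (bestExt xs 0) := by
  induction n with
  | zero =>
    intro xs hxs best hb
    have : xs = [] := List.eq_nil_of_length_eq_zero (Nat.le_zero.mp hxs)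
    subst this
    simp [countRun, bestExt]; omega
  | succ n ih =>
    intro xs hxs best hb
    cases xs with
    | nil => simp [countRun, bestExt]; omega
    | cons x rest =>
      rw [countRun]
      simp only [List.span_eq_takeWhile_dropWhile]
      set r := rest.takeWhile (fun y => decide (y = x)) with hr
      set d := rest.dropWhile (fun y => decide (y = x)) with hd
      have hsplit : r ++ d = rest := List.takeWhile_append_dropWhile
      have hdlen : d.length ≤ n := by
        have h3 : d.length ≤ rest.length := by
          rw [hd]; exact List.length_dropWhile_le _ _
        simp at hxs
        omega
      have hrall : ∀ y ∈ r, y = x := by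
        intro y hy
        have := List.mem_takeWhile_imp (l := rest) (p := fun y => decide (y = x)) hy
        simpa using this
      have hdshape := dropWhile_shape x rest
      rw [← hd] at hdshape
      by_cases hx : x = 1
      · subst hx
        rw [ih d hdlen _ (by positivity)]
        have h1 : bestExt (1 :: rest) 0 = bestExt d ((1 : Int) + r.length) := by
          rw [show ((1 : Int) :: rest) = 1 :: (r ++ d) from by rw [hsplit]]
          simp only [bestExt]
          rw [bestExt_ones_append r hrall d (0 + 1)]
          simp only [if_true]
          norm_num
        have h2 : bestExt d ((1 : Int) + r.length) = max ((1 : Int) + r.length) (bestExt d 0) :=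
          bestExt_not_one_head d (by simpa using hdshape) _ (by positivity)
        simp only [if_true]
        rw [h1, h2]
        omega
      · simp only [if_neg hx]
        rw [ih d hdlen best hb]
        have hrne : ∀ y ∈ r, y ≠ 1 := fun y hy => by rw [hrall y hy]; exact hx
        have h1 : bestExt (x :: rest) 0 = max 0 (bestExt d 0) := by
          simp only [bestExt, if_neg hx]
          rw [← hsplit, bestExt_nonones_append r hrne d]
          have := bestExt_ge d 0
          omega
        rw [h1]
        have := bestExt_ge d 0
        omega

theorem outer (arr : List (List Int)) : ∀ mx : Int, 0 ≤ mx →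
    arr.foldl (fun mx lst => (lst.foldl countStep (mx, 0)).1) mx =
    arr.foldl (fun best row => countRun best row) mx := by
  induction arr with
  | nil => intro mx _; rfl
  | cons row arr ih =>
    intro mx hmx
    simp only [List.foldl_cons]
    rw [lemA row mx 0 le_rfl hmx, lemB row.length row le_rfl mx hmx]
    exact ih _ (le_trans hmx (le_max_left _ _))

-- ===== VERDICT (by name: the statement is the Claim_ definition above) =====
theorem count_spec : Claim_equal_count := by
  intro arr _
  unfold Spec_count count count_alt
  exact outer arr 2 (by norm_num)
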